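-- pv_equiv track=rewrite | github.com/pypi-data/pypi-mirror-329 | packages/xtlib/xtlib-0.0.337.tar.gz/xtlib-0.0.337/xtlib/report_builder.py | get_user_col_info
-- ===== SOURCE A (Python) =====
-- def get_user_col_info(user_cols, col_name):
--
--     for col in user_cols:
--
--         name = col
--         user_name = None
--         fmt = None
--
--         if "=" in name:
--             name, user_name = col.split("=", 1)
--
--         if ":" in name:
--             name, fmt = name.split(":", 1)
--
--         if name == col_name:
--             return name, fmt, user_name
--
--     return None, None, None
-- ===== SOURCE B (Python) =====
-- def get_user_col_info(user_cols, col_name):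
--     # Build an index name -> (fmt, user_name) once (first occurrence wins), then one lookup.
--     table = {}
--     for col in user_cols:
--         name = col
--         user_name = None
--         if "=" in col:
--             name, user_name = col.split("=", 1)
--         fmt = None
--         if ":" in name:
--             name, fmt = name.split(":", 1)
--         table.setdefault(name, (fmt, user_name))
--     if col_name in table:
--         fmt, user_name = table[col_name]
--         return col_name, fmt, user_name
--     return None, None, None
-- ===== Notes on version B (the rewrite author's own statement) =====
-- stated objective: alternative
-- what changed: B replaces A's scan-until-first-match with building a first-wins dict index from parsed name to (fmt, user_name) via setdefault, followed by a single lookup of col_name.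
import Mathlib
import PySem

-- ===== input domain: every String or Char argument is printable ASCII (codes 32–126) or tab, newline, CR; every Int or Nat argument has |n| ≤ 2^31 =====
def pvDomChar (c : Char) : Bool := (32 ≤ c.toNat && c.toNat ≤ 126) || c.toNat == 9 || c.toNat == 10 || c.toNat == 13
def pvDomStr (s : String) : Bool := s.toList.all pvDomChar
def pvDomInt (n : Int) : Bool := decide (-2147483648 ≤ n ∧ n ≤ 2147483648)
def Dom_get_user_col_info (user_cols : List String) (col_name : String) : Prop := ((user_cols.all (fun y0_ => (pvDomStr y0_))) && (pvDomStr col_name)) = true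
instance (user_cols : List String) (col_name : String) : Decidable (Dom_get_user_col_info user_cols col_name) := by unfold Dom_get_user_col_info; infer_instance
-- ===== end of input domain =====

-- B builds a first-wins dict index (parsed name -> (fmt, user_name)) and does one lookup,
-- instead of A's scan-until-first-match; same cost, different structure (objective: alternative).

-- ===== PORT A =====
-- Python's two-target unpack "a, b = s.split(sep, 1)": exact when sep occurs in s
-- (the fallback arm is unreachable then); used by both ports' parsing steps.
def pySplit2 (s sep : String) : String × String :=
  match PySem.Str.splitMax? s sep 1 with
  | some (a :: b :: _) => (a, b)
  | _ => (s, "")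

-- literal transliteration of A's scan loop: parse each col in order, return at the first name match
def get_user_col_info (user_cols : List String) (col_name : String) : Option String × Option String × Option String :=
  match user_cols with
  | [] => (none, none, none)
  | col :: rest =>
    -- name := col; user_name := None; fmt := None, then the two conditional splits
    let p1 :=
      if PySem.Str.isIn "=" col then
        let nu := pySplit2 col "="
        (nu.1, some nu.2)
      else (col, (none : Option String))
    let p2 :=
      if PySem.Str.isIn ":" p1.1 then
        let nf := pySplit2 p1.1 ":"
        (nf.1, some nf.2)
      else (p1.1, (none : Option String))
    if p2.1 == col_name then (some p2.1, p2.2, p1.2)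
    else get_user_col_info rest col_name

-- ===== PORT B =====
-- Source B's loop-body parsing of one entry: (name, fmt, user_name)
def parseCol (col : String) : String × Option String × Option String :=
  let p1 :=
    if PySem.Str.isIn "=" col then
      let nu := pySplit2 col "="
      (nu.1, some nu.2)
    else (col, (none : Option String))
  let p2 :=
    if PySem.Str.isIn ":" p1.1 then
      let nf := pySplit2 p1.1 ":"
      (nf.1, some nf.2)
    else (p1.1, (none : Option String))
  (p2.1, p2.2, p1.2)

def get_user_col_info_alt (user_cols : List String) (col_name : String) : Option String × Option String × Option String :=
  let table := user_cols.foldl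
    (fun d col =>
      let pr := parseCol col
      d.setdefault pr.1 (pr.2.1, pr.2.2))
    (PySem.Dict.empty : PySem.Dict String (Option String × Option String))
  match table.get? col_name with
  | some fu => (some col_name, fu.1, fu.2)
  | none => (none, none, none)

-- ===== PRECONDITION & SPEC =====
def Spec_get_user_col_info (user_cols : List String) (col_name : String) (out : Option String × Option String × Option String) : Prop := out = get_user_col_info_alt user_cols col_name
instance (user_cols : List String) (col_name : String) (out : Option String × Option String × Option String) : Decidable (Spec_get_user_col_info user_cols col_name out) := by unfold Spec_get_user_col_info; infer_instance

-- ===== CLAIM (what is proved, stated in full; the proofs are below) =====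
def Claim_equal_get_user_col_info : Prop := ∀ (user_cols : List String) (col_name : String), Dom_get_user_col_info user_cols col_name → Spec_get_user_col_info user_cols col_name (get_user_col_info user_cols col_name)

-- ===== LEMMAS AND PROOFS =====

-- A's loop body on one element, phrased through parseCol (the two parse chains are identical)
theorem get_user_col_info_cons (col : String) (rest : List String) (k : String) :
    get_user_col_info (col :: rest) k =
      if (parseCol col).1 == k then (some (parseCol col).1, (parseCol col).2.1, (parseCol col).2.2)
      else get_user_col_info rest k := rfl

-- fold invariant: looking up k after the index-building fold from d is: d's answer if present,
-- otherwise A's scan over the remaining entries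
theorem fold_lookup (cols : List String) (k : String)
    (d : PySem.Dict String (Option String × Option String)) :
    (match (cols.foldl (fun d col => let pr := parseCol col; d.setdefault pr.1 (pr.2.1, pr.2.2)) d).get? k with
      | some fu => (some k, fu.1, fu.2)
      | none => ((none : Option String), (none : Option String), (none : Option String))) =
    (match d.get? k with
      | some fu => (some k, fu.1, fu.2)
      | none => get_user_col_info cols k) := by
  induction cols generalizing d with
  | nil => simp [get_user_col_info]
  | cons c rest ih =>
    rw [List.foldl_cons, ih, get_user_col_info_cons]
    by_cases hc : d.contains (parseCol c).1
    · rw [PySem.Dict.setdefault_of_contains _ _ hc]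
      rcases hget : d.get? k with _ | fu
      · have hk : (parseCol c).1 ≠ k := by
          intro h
          rw [h] at hc
          rw [PySem.Dict.contains_eq_isSome_get?, hget] at hc
          simp at hc
        simp [hk]
      · rfl
    · rw [PySem.Dict.setdefault_of_not_contains _ _ (by simpa using hc)]
      by_cases hk : (parseCol c).1 = k
      · subst hk
        rw [PySem.Dict.get?_insert_self]
        have hget : d.get? (parseCol c).1 = none := by
          rw [PySem.Dict.get?_eq_none_iff_contains]
          simpa using hc
        simp [hget]
      · rw [PySem.Dict.get?_insert_of_ne _ _ (fun h => hk h.symm)]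
        rcases hget : d.get? k with _ | fu
        · simp [hk]
        · rfl

-- ===== VERDICT (by name: the statement is the Claim_ definition above) =====
theorem get_user_col_info_spec : Claim_equal_get_user_col_info := by
  intro user_cols col_name _
  unfold Spec_get_user_col_info get_user_col_info_alt
  have h := fold_lookup user_cols col_name PySem.Dict.empty
  rw [PySem.Dict.get?_empty] at h
  exact h.symm
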